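-- pv_equiv track=rewrite | github.com/ok-oldking/ok-baijing | task/NewManXunTask.py | target_index_array
-- ===== SOURCE A (Python) =====
-- def target_index_array(lst):
--     # Pair each element with its index and sort by the element, then by the original index
--     sorted_pairs = sorted((e, i) for i, e in enumerate(lst))
--
--     # Create a list to hold the target indices
--     target_indices = [-1] * len(lst)
--
--     # Assign continuous indices to the elements in the sorted list
--     current_index = 0
--     for _, original_index in sorted_pairs:
--         if target_indices[original_index] == -1:
--             target_indices[original_index] = current_index
--             current_index += 1
--         else:
--             # If the number is equal to the previous, increment the current index
--             current_index += 1
--             target_indices[original_index] = current_index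
--
--     return target_indices
-- ===== SOURCE B (Python) =====
-- def target_index_array(lst):
--     # rank by (value, original index), computed by counting instead of sorting
--     return [sum(1 for j, y in enumerate(lst) if y < x or (y == x and j < i))
--             for i, x in enumerate(lst)]
-- ===== Notes on version B (the rewrite author's own statement) =====
-- stated objective: alternative
-- what changed: Replaced sort-then-assign (sort (value,index) pairs, then walk the sorted list writing running positions back into an index array) by a direct counting rule: rank[i] is the number of j with lst[j] < lst[i], or equal value and j < i; no sort, no mutable ranks array.
import Mathlib
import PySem

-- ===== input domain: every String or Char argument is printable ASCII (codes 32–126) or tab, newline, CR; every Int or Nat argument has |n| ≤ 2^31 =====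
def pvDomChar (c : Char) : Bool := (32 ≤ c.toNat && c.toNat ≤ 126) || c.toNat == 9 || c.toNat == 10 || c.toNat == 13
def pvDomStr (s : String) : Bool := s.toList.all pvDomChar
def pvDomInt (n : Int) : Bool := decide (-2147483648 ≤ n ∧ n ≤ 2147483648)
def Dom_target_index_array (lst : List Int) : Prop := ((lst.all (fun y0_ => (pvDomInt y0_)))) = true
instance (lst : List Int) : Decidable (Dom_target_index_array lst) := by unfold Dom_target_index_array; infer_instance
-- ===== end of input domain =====

-- B replaces A's sort-and-assign pass by a direct count (rank by (value, index)); alternative decomposition, not claimed faster.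

-- ===== PORT A =====
-- Python's tuple comparison on (int, int) pairs is exactly the lexicographic order Int ×ₗ Int,
-- so sorted((e, i) for i, e in enumerate(lst)) is PySem.List.sorted with the toLex key.
def target_index_array (lst : List Int) : List Int :=
  let sorted_pairs :=
    PySem.List.sorted ((PySem.List.enumerate lst).map (fun p => (p.2, p.1)))
      (fun q => (toLex q : Int ×ₗ Int)) false
  let target_indices := List.replicate lst.length (-1 : Int)
  -- target_indices[original_index] read/write: original_index is always 0 ≤ _ < len(lst),
  -- so pyGetD's default is never consulted and .toNat never clamps — exact here.
  let r := sorted_pairs.foldl (fun (s : List Int × Int) q =>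
      if PySem.List.pyGetD s.1 q.2 0 == -1 then
        (s.1.set q.2.toNat s.2, s.2 + 1)
      else
        (s.1.set q.2.toNat (s.2 + 1), s.2 + 1)) (target_indices, 0)
  r.1

-- ===== PORT B =====
def target_index_array_alt (lst : List Int) : List Int :=
  (PySem.List.enumerate lst).map (fun p =>
    (((PySem.List.enumerate lst).countP
        (fun q => decide (q.2 < p.2 ∨ (q.2 = p.2 ∧ q.1 < p.1))) : Nat) : Int))

-- ===== PRECONDITION & SPEC =====
def Spec_target_index_array (lst : List Int) (out : List Int) : Prop := out = target_index_array_alt lst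
instance (lst : List Int) (out : List Int) : Decidable (Spec_target_index_array lst out) := by unfold Spec_target_index_array; infer_instance

-- ===== CLAIM (what is proved, stated in full; the proofs are below) =====
def Claim_equal_target_index_array : Prop := ∀ (lst : List Int), Dom_target_index_array lst → Spec_target_index_array lst (target_index_array lst)

-- ===== LEMMAS AND PROOFS =====

-- In a strictly key-increasing list, the element at position k is preceded by exactly k smaller-keyed elements.
lemma countP_pairwise_lt {α κ : Type} [LinearOrder κ] (key : α → κ) :
    ∀ (l : List α), l.Pairwise (fun a b => key a < key b) →
      ∀ (k : Nat) (hk : k < l.length),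
        l.countP (fun q => decide (key q < key l[k])) = k := by
  intro l
  induction l with
  | nil => intro _ k hk; simp at hk
  | cons a t ih =>
    intro hp k hk
    rcases List.pairwise_cons.mp hp with ⟨ha, ht⟩
    cases k with
    | zero =>
      simp only [List.getElem_cons_zero, List.countP_cons]
      simp only [List.countP_eq_zero, decide_eq_true_eq, Nat.add_eq_zero_iff]
      constructor
      · intro x hx
        exact not_lt.mpr (le_of_lt (ha x hx))
      · simp
    | succ k =>
      have hk' : k < t.length := by simpa using hk
      have hgt : (a :: t)[k + 1] = t[k] := by simp
      rw [List.countP_cons]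
      rw [hgt]
      have hpa : (decide (key a < key t[k])) = true :=
        decide_eq_true (ha _ (List.getElem_mem hk'))
      simp [hpa, ih ht k hk']

-- A's assignment loop: with fresh (-1) in-range distinct targets, the k-th processed pair's
-- original index receives cur + k, and everything else is untouched.
lemma a_fold_spec :
    ∀ (sp : List (Int × Int)) (ti : List Int) (cur : Int),
      (∀ q ∈ sp, 0 ≤ q.2 ∧ q.2.toNat < ti.length) →
      (∀ q ∈ sp, ti.getD q.2.toNat 0 = -1) →
      (sp.map (·.2)).Nodup →
      ((sp.foldl (fun (s : List Int × Int) q =>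
          if PySem.List.pyGetD s.1 q.2 0 == -1 then
            (s.1.set q.2.toNat s.2, s.2 + 1)
          else
            (s.1.set q.2.toNat (s.2 + 1), s.2 + 1)) (ti, cur)).1.length = ti.length ∧
       ∀ j : Nat,
        (sp.foldl (fun (s : List Int × Int) q =>
          if PySem.List.pyGetD s.1 q.2 0 == -1 then
            (s.1.set q.2.toNat s.2, s.2 + 1)
          else
            (s.1.set q.2.toNat (s.2 + 1), s.2 + 1)) (ti, cur)).1.getD j 0 =
          (match PySem.List.index? (sp.map (·.2)) (j : Int) with
           | some k => cur + (k : Int)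
           | none => ti.getD j 0)) := by
  intro sp
  induction sp with
  | nil =>
    intro ti cur _ _ _
    constructor
    · rfl
    · intro j
      simp [PySem.List.index?]
  | cons q rest ih =>
    intro ti cur hb hf hn
    have hq2 : 0 ≤ q.2 ∧ q.2.toNat < ti.length := hb q (List.mem_cons_self ..)
    have hget : PySem.List.pyGetD ti q.2 0 = ti.getD q.2.toNat 0 :=
      PySem.List.pyGetD_of_nonneg ti 0 hq2.1
    have hcond : (PySem.List.pyGetD ti q.2 0 == -1) = true := by
      rw [hget, hf q (List.mem_cons_self ..)]; rfl
    have hnotmem : q.2 ∉ rest.map (·.2) := by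
      have := hn; simp only [List.map_cons, List.nodup_cons] at this; exact this.1
    have hn' : (rest.map (·.2)).Nodup := by
      have := hn; simp only [List.map_cons, List.nodup_cons] at this; exact this.2
    have hb' : ∀ p ∈ rest, 0 ≤ p.2 ∧ p.2.toNat < (ti.set q.2.toNat cur).length := by
      intro p hp; simpa using hb p (List.mem_cons_of_mem _ hp)
    have hf' : ∀ p ∈ rest, (ti.set q.2.toNat cur).getD p.2.toNat 0 = -1 := by
      intro p hp
      have hp2 := hb p (List.mem_cons_of_mem _ hp)
      have hne : q.2.toNat ≠ p.2.toNat := by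
        intro he
        apply hnotmem
        have hqe : q.2 = p.2 := by omega
        rw [hqe]
        exact List.mem_map_of_mem hp
      have hfp := hf p (List.mem_cons_of_mem _ hp)
      rw [← hfp]
      simp [List.getD_eq_getElem?_getD, List.getElem?_set_ne hne]
    obtain ⟨ihlen, ihval⟩ := ih (ti.set q.2.toNat cur) (cur + 1) hb' hf' hn'
    constructor
    · simp only [List.foldl_cons]
      rw [if_pos hcond]
      rw [ihlen]
      simp
    · intro j
      simp only [List.foldl_cons]
      rw [if_pos hcond]
      by_cases hj : (j : Int) = q.2
      · have hidx : PySem.List.index? ((q :: rest).map (·.2)) (j : Int) = some 0 := by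
          simp only [List.map_cons, ← hj]
          exact PySem.List.index?_cons_self ..
        have hidx' : PySem.List.index? (rest.map (·.2)) (j : Int) = none :=
          (PySem.List.index?_eq_none_iff ..).mpr (by rw [hj]; exact hnotmem)
        have hv := ihval j
        rw [hidx'] at hv
        rw [hidx, hv]
        have hjn : j = q.2.toNat := by omega
        subst hjn
        simp [List.getD_eq_getElem?_getD, List.getElem?_set_self hq2.2]
      · have hidx : PySem.List.index? ((q :: rest).map (·.2)) (j : Int) =
            (PySem.List.index? (rest.map (·.2)) (j : Int)).map (· + 1) := by
          simp only [List.map_cons]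
          exact PySem.List.index?_cons_of_ne _ (fun h => hj h.symm)
        rw [hidx]
        have hv := ihval j
        rw [hv]
        cases hcase : PySem.List.index? (rest.map (·.2)) (j : Int) with
        | some k =>
          simp only [Option.map_some]
          push_cast
          ring
        | none =>
          simp only [Option.map_none]
          have hne : q.2.toNat ≠ j := fun he => hj (by omega)
          simp [List.getD_eq_getElem?_getD, List.getElem?_set_ne hne]

lemma target_index_array_eq_alt (lst : List Int) :
    target_index_array lst = target_index_array_alt lst := by
  have hperm : (PySem.List.sorted ((PySem.List.enumerate lst).map (fun p => (p.2, p.1)))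
      (fun q => (toLex q : Int ×ₗ Int)) false).Perm
      ((PySem.List.enumerate lst).map (fun p => (p.2, p.1))) :=
    PySem.List.sorted_perm ..
  set pairs := (PySem.List.enumerate lst).map (fun p => (p.2, p.1)) with hpairs
  set sp := PySem.List.sorted pairs (fun q => (toLex q : Int ×ₗ Int)) false with hsp
  have hsnd : pairs.map (fun x => x.2) = PySem.List.pyRange 0 (0 + (lst.length : Int)) := by
    rw [hpairs, List.map_map]
    have : ((fun x : Int × Int => x.2) ∘ (fun p : Int × Int => (p.2, p.1))) =
        (fun p : Int × Int => p.1) := rfl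
    rw [this]
    exact PySem.List.map_fst_enumerate ..
  have hsndperm : (sp.map (fun x => x.2)).Perm (pairs.map (fun x => x.2)) := hperm.map _
  have hnodup_pairs_snd : (pairs.map (fun x => x.2)).Nodup := by
    rw [hsnd]; exact PySem.List.nodup_pyRange_one ..
  have hnodup_sp_snd : (sp.map (fun x => x.2)).Nodup := hsndperm.nodup_iff.mpr hnodup_pairs_snd
  have hpairs_nodup : pairs.Nodup := List.Nodup.of_map _ hnodup_pairs_snd
  have hsp_nodup : sp.Nodup := hperm.nodup_iff.mpr hpairs_nodup
  have hle : sp.Pairwise (fun a b => (toLex a : Int ×ₗ Int) ≤ toLex b) :=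
    PySem.List.sorted_pairwise pairs _
  have hlt : sp.Pairwise (fun a b => (toLex a : Int ×ₗ Int) < toLex b) := by
    refine (hle.and hsp_nodup).imp ?_
    intro a b h
    exact lt_of_le_of_ne h.1 (fun hk => h.2 (toLex_inj.mp hk))
  have hmem_pairs : ∀ q ∈ pairs, ∃ (m : Nat) (_ : m < lst.length), q = (lst[m], (m : Int)) := by
    intro q hq
    rcases List.mem_map.mp hq with ⟨p, hp, rfl⟩
    rcases (PySem.List.mem_enumerate_iff ..).mp hp with ⟨m, hm, rfl⟩
    exact ⟨m, hm, by simp⟩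
  have hb : ∀ q ∈ sp, 0 ≤ q.2 ∧ q.2.toNat < (List.replicate lst.length (-1 : Int)).length := by
    intro q hq
    rcases hmem_pairs q (hperm.subset hq) with ⟨m, hm, rfl⟩
    simp; omega
  have hf : ∀ q ∈ sp, (List.replicate lst.length (-1 : Int)).getD q.2.toNat 0 = -1 := by
    intro q hq
    rcases hmem_pairs q (hperm.subset hq) with ⟨m, hm, rfl⟩
    simp [List.getD_eq_getElem?_getD, hm]
  obtain ⟨hlen, hval⟩ :=
    a_fold_spec sp (List.replicate lst.length (-1 : Int)) 0 hb hf hnodup_sp_snd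
  have hA : target_index_array lst =
      (sp.foldl (fun (s : List Int × Int) q =>
        if PySem.List.pyGetD s.1 q.2 0 == -1 then
          (s.1.set q.2.toNat s.2, s.2 + 1)
        else
          (s.1.set q.2.toNat (s.2 + 1), s.2 + 1)) (List.replicate lst.length (-1 : Int), 0)).1 := rfl
  have hAlen : (target_index_array lst).length = lst.length := by
    rw [hA, hlen]; simp
  have hBlen : (target_index_array_alt lst).length = lst.length := by
    simp [target_index_array_alt]
  apply List.ext_getElem (by rw [hAlen, hBlen])
  intro i h1 h2
  have hi : i < lst.length := by rwa [hAlen] at h1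
  -- locate i among the sorted pairs
  have hmem : (i : Int) ∈ sp.map (fun x => x.2) := by
    apply hsndperm.mem_iff.mpr
    rw [hsnd, PySem.List.mem_pyRange_one]
    constructor
    · exact Int.natCast_nonneg i
    · omega
  obtain ⟨k, hk⟩ : ∃ k, PySem.List.index? (sp.map (fun x => x.2)) (i : Int) = some k := by
    rcases Option.isSome_iff_exists.mp
      ((PySem.List.index?_isSome_iff ..).mpr hmem) with ⟨k, hk'⟩
    exact ⟨k, hk'⟩
  obtain ⟨hklt, hssk, -⟩ := PySem.List.getElem_of_index?_eq_some hk
  have hklt' : k < sp.length := by simpa using hklt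
  have hspk : sp[k]'hklt' = (lst[i]'hi, (i : Int)) := by
    have hspk2 : (sp[k]'hklt').2 = (i : Int) := by
      have h := hssk
      simpa using h
    rcases hmem_pairs _ (hperm.subset (List.getElem_mem hklt')) with ⟨m, hm, hqm⟩
    have hmi : m = i := by
      rw [hqm] at hspk2
      simpa using hspk2
    subst hmi
    exact hqm
  have hkcount : sp.countP
      (fun q => decide ((toLex q : Int ×ₗ Int) < toLex (lst[i]'hi, (i : Int)))) = k := by
    have hc := countP_pairwise_lt (fun q => (toLex q : Int ×ₗ Int)) sp hlt k hklt'
    rw [hspk] at hc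
    exact hc
  have hcount2 : sp.countP
      (fun q => decide ((toLex q : Int ×ₗ Int) < toLex (lst[i]'hi, (i : Int)))) =
      (PySem.List.enumerate lst).countP
        (fun q => decide (q.2 < lst[i]'hi ∨ (q.2 = lst[i]'hi ∧ q.1 < (i : Int)))) := by
    rw [hperm.countP_eq, hpairs, List.countP_map]
    apply List.countP_congr
    intro q _
    simp only [Function.comp, decide_eq_true_eq]
    rw [Prod.Lex.lt_iff]
    simp
  -- A's value at i
  have hval_i := hval i
  rw [hk] at hval_i
  have hAi : (target_index_array lst)[i]'h1 = (k : Int) := by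
    have : (target_index_array lst)[i]'h1 = (target_index_array lst).getD i 0 := by
      rw [List.getD_eq_getElem?_getD, List.getElem?_eq_getElem h1]
      rfl
    rw [this, hA, hval_i]
    simp
  -- B's value at i
  have hBi : (target_index_array_alt lst)[i]'h2 =
      (((PySem.List.enumerate lst).countP
        (fun q => decide (q.2 < lst[i]'hi ∨ (q.2 = lst[i]'hi ∧ q.1 < (i : Int)))) : Nat) : Int) := by
    simp only [target_index_array_alt, List.getElem_map]
    have hE : (PySem.List.enumerate lst)[i]'(by simpa using hi) = ((i : Int), lst[i]'hi) := by
      rw [PySem.List.getElem_enumerate]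
      simp
    rw [hE]
  rw [hAi, hBi, ← hcount2, hkcount]

-- ===== VERDICT (by name: the statement is the Claim_ definition above) =====
theorem target_index_array_spec : Claim_equal_target_index_array := by
  intro lst _
  exact target_index_array_eq_alt lst
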